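-- pv_equiv track=rewrite | github.com/izyanrashdan5-ux/PythonProject1 | test.py | merge_line
-- ===== SOURCE A (Python) =====
-- SIZE = 4  # ukuran papan 4x4
--
-- def merge_line(line):
--     """
--     Menerima 1 baris (list panjang 4).
--     Contoh line: [2, 0, 2, 4]
--     1. Buang 0 -> [2, 2, 4]
--     2. Gabungkan angka yang sama sekali saja ->
--        [4, 4]
--     3. Tambah 0 di belakang sampai panjang 4 -> [4, 4, 0, 0]
--     """
--     # Buang semua 0
--     non_zero = [v for v in line if v != 0]
--
--     new_line = []
--     i = 0
--     while i < len(non_zero):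
--         # Jika dua angka berurutan sama, gabungkan
--         if i + 1 < len(non_zero) and non_zero[i] == non_zero[i + 1]:
--             new_line.append(non_zero[i] * 2)
--             i += 2  # lompat 2 karena sudah digabung
--         else:
--             new_line.append(non_zero[i])
--             i += 1
--
--     # Tambah 0 di belakang sampai panjangnya 4
--     while len(new_line) < SIZE:
--         new_line.append(0)
--
--     return new_line
-- ===== SOURCE B (Python) =====
-- SIZE = 4
--
-- def merge_line(line):
--     # One forward pass: a 'merged' flag for the last appended tile replaces A's
--     # index look-ahead and i += 2 skip; zeros are skipped inline.
--     result = []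
--     merged = False
--     for v in line:
--         if v == 0:
--             continue
--         if result and not merged and result[-1] == v:
--             result[-1] *= 2
--             merged = True
--         else:
--             result.append(v)
--             merged = False
--     return result + [0] * (SIZE - len(result))
-- ===== Notes on version B (the rewrite author's own statement) =====
-- stated objective: simpler
-- what changed: Replaces A's index loop with look-ahead (non_zero[i] == non_zero[i+1], i += 2 skip) by a single accumulator pass keeping a 'merged' flag for the last appended tile, skipping zeros inline (no intermediate filtered list) and padding arithmetically.
import Mathlib
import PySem

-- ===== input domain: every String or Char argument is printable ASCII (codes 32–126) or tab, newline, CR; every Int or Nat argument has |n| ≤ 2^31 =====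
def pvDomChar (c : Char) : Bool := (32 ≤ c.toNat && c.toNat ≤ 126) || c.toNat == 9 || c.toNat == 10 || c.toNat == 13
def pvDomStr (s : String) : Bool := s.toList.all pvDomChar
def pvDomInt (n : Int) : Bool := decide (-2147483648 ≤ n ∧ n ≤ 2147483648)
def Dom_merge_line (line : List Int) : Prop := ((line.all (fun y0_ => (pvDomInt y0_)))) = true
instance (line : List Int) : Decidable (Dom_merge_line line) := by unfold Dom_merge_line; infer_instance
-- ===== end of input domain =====

-- B changes the decomposition: one forward pass with a 'merged' flag on the last
-- appended tile instead of A's index look-ahead with an i += 2 skip; same output.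

-- ===== PORT A =====
-- A's while loop over indices i of non_zero: 'two equal neighbours remain' is the
-- i+1 < len ∧ nz[i] = nz[i+1] test; i += 2 drops both, i += 1 drops one.
def mergeLoopA : List Int → List Int
  | [] => []
  | [a] => [a]
  | a :: b :: rest =>
    if a = b then a * 2 :: mergeLoopA rest
    else a :: mergeLoopA (b :: rest)

-- A's final while loop appends 0 until length SIZE = 4 (exact closed form).
def padA (r : List Int) : List Int := r ++ List.replicate (4 - r.length) 0

def merge_line (line : List Int) : List Int :=
  padA (mergeLoopA (line.filter (fun v => v ≠ 0)))

-- ===== PORT B =====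
-- B's loop state: (result reversed, merged flag); zeros skipped inline.
def stepB (st : List Int × Bool) (v : Int) : List Int × Bool :=
  if v = 0 then st
  else
    match st with
    | (last :: rest, merged) =>
      if !merged && last = v then (last * 2 :: rest, true)
      else (v :: last :: rest, false)
    | ([], _) => ([v], false)

def merge_line_alt (line : List Int) : List Int :=
  let st := line.foldl stepB ([], false)
  st.1.reverse ++ List.replicate (4 - st.1.length) 0

-- ===== PRECONDITION & SPEC =====
def Spec_merge_line (line : List Int) (out : List Int) : Prop := out = merge_line_alt line
instance (line : List Int) (out : List Int) : Decidable (Spec_merge_line line out) := by unfold Spec_merge_line; infer_instance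

-- ===== CLAIM (what is proved, stated in full; the proofs are below) =====
def Claim_equal_merge_line : Prop := ∀ (line : List Int), Dom_merge_line line → Spec_merge_line line (merge_line line)

-- ===== LEMMAS AND PROOFS =====

theorem stepB_skip_zero (st : List Int × Bool) (v : Int) (h : v = 0) :
    stepB st v = st := by simp [stepB, h]

theorem stepB_true (acc : List Int) (v : Int) (hv : v ≠ 0) :
    stepB (acc, true) v = (v :: acc, false) := by
  cases acc <;> simp [stepB, hv]

-- the flag left behind by the merge pass (same recursion as mergeLoopA)
def flagA : List Int → Bool
  | [] => true
  | [_] => false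
  | a :: b :: rest => if a = b then flagA rest else flagA (b :: rest)

-- main invariant: starting with a protected head (flag = true), B's fold computes
-- A's merge of the zero-free remaining list, reversed onto the accumulator.
theorem foldB_true (l : List Int) (hz : ∀ v ∈ l, v ≠ 0) (acc : List Int) :
    l.foldl stepB (acc, true) = ((mergeLoopA l).reverse ++ acc, flagA l) := by
  induction l using mergeLoopA.induct generalizing acc with
  | case1 => simp [mergeLoopA, flagA]
  | case2 a =>
    have ha := hz a (by simp)
    simp [mergeLoopA, flagA, stepB_true acc a ha]
  | case3 b rest ih =>
    have hb := hz b (by simp)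
    have hz' : ∀ v ∈ rest, v ≠ 0 := fun v hv => hz v (by simp [hv])
    rw [List.foldl_cons, stepB_true acc b hb, List.foldl_cons]
    have h2 : stepB (b :: acc, false) b = (b * 2 :: acc, true) := by simp [stepB, hb]
    rw [h2, ih hz']
    simp [mergeLoopA, flagA]
  | case4 a b rest hab ih =>
    have ha := hz a (by simp)
    have hb := hz b (by simp)
    have hz' : ∀ v ∈ b :: rest, v ≠ 0 := fun v hv => hz v (by simp at hv ⊢; tauto)
    rw [List.foldl_cons, stepB_true acc a ha, List.foldl_cons]
    have h2 : stepB (a :: acc, false) b = (b :: a :: acc, false) := by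
      simp [stepB, hb, hab]
    rw [h2]
    have key := ih hz' (a :: acc)
    rw [List.foldl_cons, stepB_true (a :: acc) b hb] at key
    rw [key]
    simp [mergeLoopA, flagA, hab]

theorem foldB_init (l : List Int) (hz : ∀ v ∈ l, v ≠ 0) :
    (l.foldl stepB (([] : List Int), false)).1 = (mergeLoopA l).reverse := by
  cases l with
  | nil => simp [mergeLoopA]
  | cons a t =>
    have ha := hz a (by simp)
    have h1 : stepB (([] : List Int), false) a = ([a], false) := by simp [stepB, ha]
    have h2 : stepB (([] : List Int), true) a = ([a], false) := by simp [stepB, ha]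
    have := foldB_true (a :: t) hz []
    rw [List.foldl_cons, h2] at this
    rw [List.foldl_cons, h1, this]
    simp

-- folding B's step over the raw line equals folding it over the zero-free line
theorem foldB_filter (l : List Int) (st : List Int × Bool) :
    l.foldl stepB st = (l.filter (fun v => v ≠ 0)).foldl stepB st := by
  induction l generalizing st with
  | nil => rfl
  | cons a t ih =>
    by_cases ha : a = 0
    · rw [List.foldl_cons, stepB_skip_zero st a ha, ih]
      simp [ha]
    · rw [List.foldl_cons, ih]
      simp [ha]

-- ===== VERDICT (by name: the statement is the Claim_ definition above) =====
theorem merge_line_spec : Claim_equal_merge_line := by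
  intro line _
  show merge_line line = merge_line_alt line
  have hz : ∀ v ∈ line.filter (fun v => v ≠ 0), v ≠ 0 := by
    intro v hv; simpa using (List.of_mem_filter hv)
  unfold merge_line merge_line_alt padA
  rw [foldB_filter]
  simp only []
  rw [foldB_init _ hz]
  simp
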